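-- pv_equiv track=rewrite | github.com/nishantnasa/bakery-challenge | main.py | get_order_qty
-- ===== SOURCE A (Python) =====
-- def get_order_qty(packs, user_qty):
--     queue = []
--     min_order_pack_idx_list = min_packs(packs=packs, user_qty=user_qty)
--     start = len(min_order_pack_idx_list) - 1
--
--     if min_order_pack_idx_list[start] == -1:
--         # print "No Order possible with available package combinations."
--         return {}
--
--     while start != 0:
--         pack = packs[min_order_pack_idx_list[start]]
--         start = start - pack
--         queue.append(pack)
--
--     return {q: queue.count(q) for q in queue}
--
-- def min_packs(packs, user_qty):
--     idx_range = user_qty + 1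
--     min_packs = [0 if idx == 0 else float("inf") for idx in range(idx_range)]
--     min_order_pack_idx = [-1 for _ in range(idx_range)]
--
--     for j in range(len(packs)):
--         for i in range(1, idx_range):
--             pack = packs[j]
--             if i >= packs[j]:
--                 if min_packs[i] > 1 + min_packs[i - pack]:
--                     min_packs[i] = 1 + min_packs[i - pack]
--                     min_order_pack_idx[i] = j
--
--     return min_order_pack_idx
-- ===== SOURCE B (Python) =====
-- def get_order_qty(packs, user_qty):
--     size = user_qty + 1
--     best = [0 if i == 0 else float("inf") for i in range(size)]
--     comp = [{} if i == 0 else None for i in range(size)]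
--     for j in range(len(packs)):
--         for i in range(1, size):
--             pack = packs[j]
--             if i >= pack:
--                 if best[i] > 1 + best[i - pack]:
--                     best[i] = 1 + best[i - pack]
--                     prev = comp[i - pack]
--                     fresh = {pack: prev.get(pack, 0) + 1}
--                     for k in prev:
--                         if k != pack:
--                             fresh[k] = prev[k]
--                     comp[i] = fresh
--     if user_qty < 0 or comp[user_qty] is None:
--         return {}
--     return comp[user_qty]
-- ===== Notes on version B (the rewrite author's own statement) =====
-- stated objective: alternative
-- what changed: B's DP table carries the actual cheapest composition dict for every amount instead of backpointer indices, so the answer is read directly from the table and A's backpointer-walk plus quadratic queue.count recounting pass disappear.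
import Mathlib
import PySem

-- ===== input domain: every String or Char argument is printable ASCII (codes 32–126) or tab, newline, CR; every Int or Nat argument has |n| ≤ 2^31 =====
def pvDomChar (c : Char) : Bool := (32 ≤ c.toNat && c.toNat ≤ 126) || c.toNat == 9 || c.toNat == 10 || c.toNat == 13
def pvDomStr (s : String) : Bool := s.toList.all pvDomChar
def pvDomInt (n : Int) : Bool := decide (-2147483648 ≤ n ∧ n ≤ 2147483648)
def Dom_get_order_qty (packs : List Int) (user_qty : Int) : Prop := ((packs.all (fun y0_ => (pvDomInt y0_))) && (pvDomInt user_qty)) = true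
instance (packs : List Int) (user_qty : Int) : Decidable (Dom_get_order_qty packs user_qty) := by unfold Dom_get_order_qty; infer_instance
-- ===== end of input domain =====

-- B carries the cheapest composition dict per amount in the DP table itself, replacing A's
-- backpointer array + reconstruction walk + quadratic recount (objective: alternative, same cost class).

-- ===== PORT A =====
-- float('inf') is modeled as `none`: in both Pythons infinity only occurs as `1 + inf` and
-- as an operand of `>`, where this model is exact.
def pvInfAdd1 : Option Int → Option Int
  | none => none
  | some x => some (1 + x)

def pvInfGt : Option Int → Option Int → Bool
  | none, none => false
  | none, some _ => true
  | some _, none => false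
  | some a, some b => decide (b < a)

-- a Python list of DP cells is an array: xs[i] (negative index from the end, none = IndexError)
-- and xs[i] = v, exactly as PySem.List.pyGet?/pySetD but on Array
def pvAGet? {α : Type} (a : Array α) (i : Int) : Option α :=
  if 0 ≤ i then a[i.toNat]?
  else if 0 ≤ (a.size : Int) + i then a[((a.size : Int) + i).toNat]? else none

def pvASet {α : Type} (a : Array α) (i : Int) (v : α) : Array α :=
  if 0 ≤ i then a.setIfInBounds i.toNat v
  else a.setIfInBounds ((a.size : Int) + i).toNat v

-- body of the inner `for i in range(1, idx_range)` loop of `min_packs`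
def pvInnerA (packs : List Int) (j : Int) (st : Array (Option Int) × Array Int) (i : Int) :
    Array (Option Int) × Array Int :=
  let pack := PySem.List.pyGetD packs j 0
  if i ≥ pack then
    if pvInfGt ((pvAGet? st.1 i).getD none)
        (pvInfAdd1 ((pvAGet? st.1 (i - pack)).getD none)) then
      (pvASet st.1 i (pvInfAdd1 ((pvAGet? st.1 (i - pack)).getD none)),
       pvASet st.2 i j)
    else st
  else st

def pvMinPacks (packs : List Int) (user_qty : Int) : Array Int :=
  let idx_range := user_qty + 1
  ((PySem.List.pyRange 0 (packs.length : Int)).foldl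
    (fun st j => (PySem.List.pyRange 1 idx_range).foldl (pvInnerA packs j) st)
    (((PySem.List.pyRange 0 idx_range).map (fun idx => if idx = 0 then some 0 else none)).toArray,
     ((PySem.List.pyRange 0 idx_range).map (fun _ => (-1 : Int))).toArray)).2

-- the `while start != 0` walk; fuel makes it total, unreachable defaults mirror the raises Pre_ excludes
def pvTrace (packs : List Int) (idxl : Array Int) : Nat → Int → List Int → List Int
  | 0, _, queue => queue
  | fuel+1, start, queue =>
    if start ≠ 0 then
      pvTrace packs idxl fuel
        (start - (PySem.List.pyGet? packs ((pvAGet? idxl start).getD (-1))).getD 0)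
        (queue ++ [(PySem.List.pyGet? packs ((pvAGet? idxl start).getD (-1))).getD 0])
    else queue

def get_order_qty (packs : List Int) (user_qty : Int) : List (Int × Int) :=
  let idxl := pvMinPacks packs user_qty
  let start : Int := (idxl.size : Int) - 1
  if ((pvAGet? idxl start).getD (-1)) = -1 then []
  else
    let queue := pvTrace packs idxl (user_qty.toNat + 1) start []
    (queue.foldl (fun d q => PySem.Dict.insert d q ((PySem.List.count queue q : Nat) : Int))
      PySem.Dict.empty).items

-- ===== PORT B =====
-- `fresh = {pack: prev.get(pack, 0) + 1}` then the `for k in prev` copy loop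
def pvFresh (pack : Int) (prev : PySem.Dict Int Int) : PySem.Dict Int Int :=
  prev.items.foldl (fun d kv => if kv.1 ≠ pack then d.insert kv.1 kv.2 else d)
    (PySem.Dict.insert PySem.Dict.empty pack (prev.getD pack 0 + 1))

-- body of the inner `for i in range(1, size)` loop
def pvInnerB (packs : List Int) (j : Int)
    (st : Array (Option Int) × Array (Option (PySem.Dict Int Int))) (i : Int) :
    Array (Option Int) × Array (Option (PySem.Dict Int Int)) :=
  let pack := PySem.List.pyGetD packs j 0
  if i ≥ pack then
    if pvInfGt ((pvAGet? st.1 i).getD none)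
        (pvInfAdd1 ((pvAGet? st.1 (i - pack)).getD none)) then
      (pvASet st.1 i (pvInfAdd1 ((pvAGet? st.1 (i - pack)).getD none)),
       pvASet st.2 i
         (some (pvFresh (PySem.List.pyGetD packs j 0)
           (((pvAGet? st.2 (i - pack)).getD none).getD PySem.Dict.empty))))
    else st
  else st

def get_order_qty_alt (packs : List Int) (user_qty : Int) : List (Int × Int) :=
  let size := user_qty + 1
  let st := (PySem.List.pyRange 0 (packs.length : Int)).foldl
    (fun st j => (PySem.List.pyRange 1 size).foldl (pvInnerB packs j) st)
    (((PySem.List.pyRange 0 size).map (fun i => if i = 0 then some 0 else none)).toArray,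
     ((PySem.List.pyRange 0 size).map
       (fun i => if i = 0 then some (PySem.Dict.empty : PySem.Dict Int Int) else none)).toArray)
  if user_qty < 0 then []
  else
    match (pvAGet? st.2 user_qty).getD none with
    | none => []
    | some d => d.items

-- ===== PRECONDITION & SPEC =====
-- Pre_ is exactly where A returns: A raises IndexError when user_qty < 0 (it indexes an empty
-- table) and when user_qty ≥ 1 and some pack is negative (index i - pack runs past the table).
def Pre_get_order_qty (packs : List Int) (user_qty : Int) : Prop :=
  0 ≤ user_qty ∧ (user_qty = 0 ∨ ∀ p ∈ packs, 0 ≤ p)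
instance (packs : List Int) (user_qty : Int) : Decidable (Pre_get_order_qty packs user_qty) := by
  unfold Pre_get_order_qty; infer_instance

def pvWitness_get_order_qty : List Int × Int := ([2, 3], 7)

def Spec_get_order_qty (packs : List Int) (user_qty : Int) (out : List (Int × Int)) : Prop :=
  out = get_order_qty_alt packs user_qty
instance (packs : List Int) (user_qty : Int) (out : List (Int × Int)) :
    Decidable (Spec_get_order_qty packs user_qty out) := by unfold Spec_get_order_qty; infer_instance

-- ===== CLAIM (what is proved, stated in full; the proofs are below) =====
def Claim_equal_get_order_qty : Prop := ∀ (packs : List Int) (user_qty : Int),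
  Dom_get_order_qty packs user_qty → Pre_get_order_qty packs user_qty →
  Spec_get_order_qty packs user_qty (get_order_qty packs user_qty)

-- ===== LEMMAS AND PROOFS =====

-- the combined execution: A's (min, idx) state and B's comp state evolved in lockstep
abbrev PvC := Array (Option Int) × Array Int × Array (Option (PySem.Dict Int Int))

def pvInnerC (packs : List Int) (j : Int) (st : PvC) (i : Int) : PvC :=
  let pack := PySem.List.pyGetD packs j 0
  if i ≥ pack then
    if pvInfGt ((pvAGet? st.1 i).getD none)
        (pvInfAdd1 ((pvAGet? st.1 (i - pack)).getD none)) then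
      (pvASet st.1 i (pvInfAdd1 ((pvAGet? st.1 (i - pack)).getD none)),
       pvASet st.2.1 i j,
       pvASet st.2.2 i
         (some (pvFresh (PySem.List.pyGetD packs j 0)
           (((pvAGet? st.2.2 (i - pack)).getD none).getD PySem.Dict.empty))))
    else st
  else st

def pvInit (n : Nat) : PvC :=
  (((PySem.List.pyRange 0 ((n : Int) + 1)).map (fun idx => if idx = 0 then some 0 else none)).toArray,
   ((PySem.List.pyRange 0 ((n : Int) + 1)).map (fun _ => (-1 : Int))).toArray,
   ((PySem.List.pyRange 0 ((n : Int) + 1)).map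
     (fun idx => if idx = 0 then some (PySem.Dict.empty : PySem.Dict Int Int) else none)).toArray)

def pvPass (packs : List Int) (n : Nat) (j : Int) (st : PvC) : PvC :=
  (PySem.List.pyRange 1 ((n : Int) + 1)).foldl (pvInnerC packs j) st

def pvRun (packs : List Int) (n : Nat) : PvC :=
  (PySem.List.pyRange 0 (packs.length : Int)).foldl (fun st j => pvPass packs n j st) (pvInit n)

def pvM (s : PvC) (i : Nat) : Option Int := s.1.getD i none
def pvI (s : PvC) (i : Nat) : Int := s.2.1.getD i (-1)
def pvD (s : PvC) (i : Nat) : Option (PySem.Dict Int Int) := s.2.2.getD i none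

lemma pvM_mk (a : Array (Option Int)) (b : Array Int) (c : Array (Option (PySem.Dict Int Int)))
    (k : Nat) : pvM (a, b, c) k = a.getD k none := rfl

lemma pvInnerCA (packs : List Int) (j : Int) (c : PvC) (i : Int) :
    pvInnerA packs j (c.1, c.2.1) i = ((pvInnerC packs j c i).1, (pvInnerC packs j c i).2.1) := by
  obtain ⟨m, idx, cmp⟩ := c
  unfold pvInnerA pvInnerC
  dsimp only
  split_ifs <;> rfl

lemma pvInnerCB (packs : List Int) (j : Int) (c : PvC) (i : Int) :
    pvInnerB packs j (c.1, c.2.2) i = ((pvInnerC packs j c i).1, (pvInnerC packs j c i).2.2) := by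
  obtain ⟨m, idx, cmp⟩ := c
  unfold pvInnerB pvInnerC
  dsimp only
  split_ifs <;> rfl

lemma pvProjA (packs : List Int) (user_qty : Int) (h : 0 ≤ user_qty) :
    pvMinPacks packs user_qty = (pvRun packs user_qty.toNat).2.1 := by
  have hq : user_qty + 1 = ((user_qty.toNat : Int) + 1) := by omega
  have key := List.foldl_hom (f := fun c : PvC => (c.1, c.2.1))
    (g₁ := fun st j => (PySem.List.pyRange 1 ((user_qty.toNat : Int) + 1)).foldl (pvInnerC packs j) st)
    (g₂ := fun st j => (PySem.List.pyRange 1 ((user_qty.toNat : Int) + 1)).foldl (pvInnerA packs j) st)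
    (l := PySem.List.pyRange 0 (packs.length : Int)) (init := pvInit user_qty.toNat)
    (fun c j => List.foldl_hom _ (fun c i => pvInnerCA packs j c i))
  dsimp only [pvMinPacks]
  rw [hq]
  exact congrArg Prod.snd key

lemma pvProjB (packs : List Int) (user_qty : Int) (h : 0 ≤ user_qty) :
    get_order_qty_alt packs user_qty =
      (if user_qty < 0 then []
       else match (pvAGet? (pvRun packs user_qty.toNat).2.2 user_qty).getD none with
            | none => []
            | some d => d.items) := by
  have hq : user_qty + 1 = ((user_qty.toNat : Int) + 1) := by omega
  have key := List.foldl_hom (f := fun c : PvC => (c.1, c.2.2))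
    (g₁ := fun st j => (PySem.List.pyRange 1 ((user_qty.toNat : Int) + 1)).foldl (pvInnerC packs j) st)
    (g₂ := fun st j => (PySem.List.pyRange 1 ((user_qty.toNat : Int) + 1)).foldl (pvInnerB packs j) st)
    (l := PySem.List.pyRange 0 (packs.length : Int)) (init := pvInit user_qty.toNat)
    (fun c j => List.foldl_hom _ (fun c i => pvInnerCB packs j c i))
  have hinit : ((fun c : PvC => (c.1, c.2.2)) (pvInit user_qty.toNat)) =
      (((PySem.List.pyRange 0 ((user_qty.toNat : Int) + 1)).map (fun i => if i = 0 then some 0 else none)).toArray,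
       ((PySem.List.pyRange 0 ((user_qty.toNat : Int) + 1)).map
         (fun i => if i = 0 then some (PySem.Dict.empty : PySem.Dict Int Int) else none)).toArray) := rfl
  rw [hinit] at key
  have key2 : (List.foldl (fun st j => List.foldl (pvInnerB packs j) st (PySem.List.pyRange 1 ((user_qty.toNat : Int) + 1)))
      (((PySem.List.pyRange 0 ((user_qty.toNat : Int) + 1)).map (fun i => if i = 0 then some 0 else none)).toArray,
       ((PySem.List.pyRange 0 ((user_qty.toNat : Int) + 1)).map
         (fun i => if i = 0 then some (PySem.Dict.empty : PySem.Dict Int Int) else none)).toArray)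
      (PySem.List.pyRange 0 (packs.length : Int))) =
      ((pvRun packs user_qty.toNat).1, (pvRun packs user_qty.toNat).2.2) := by
    unfold pvRun pvPass; exact key
  dsimp only [get_order_qty_alt]
  rw [hq, key2]

-- composition-count dict built back-to-front, as B builds it
def pvCountD : List Int → PySem.Dict Int Int
  | [] => PySem.Dict.empty
  | q :: rest => pvFresh q (pvCountD rest)

-- the invariant carried through the combined execution
def pvGood (packs : List Int) (n : Nat) (s : PvC) : Prop :=
  s.1.size = n + 1 ∧ s.2.1.size = n + 1 ∧ s.2.2.size = n + 1 ∧
  pvM s 0 = some 0 ∧ pvI s 0 = -1 ∧ pvD s 0 = some PySem.Dict.empty ∧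
  ∀ i : Nat, 1 ≤ i → i ≤ n →
    (pvM s i = none → pvI s i = -1 ∧ pvD s i = none) ∧
    ∀ v : Int, pvM s i = some v →
      ∃ j p : Nat, pvI s i = (j : Int) ∧ j < packs.length ∧ packs.getD j 0 = (p : Int) ∧
        1 ≤ p ∧ p ≤ i ∧
        (∃ w : Int, pvM s (i - p) = some w ∧ w ≤ v - 1 ∧
          ∃ d, pvD s i = some (pvFresh (p : Int) d) ∧ (w = v - 1 → pvD s (i - p) = some d)) ∧
        (∃ L : List Int, (∀ x ∈ L, x ∈ packs) ∧ (∀ x ∈ L, 1 ≤ x) ∧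
          L.sum = (i : Int) ∧ (L.length : Int) = v)

lemma pvGetD_set_self {α : Type} (l : Array α) (k : Nat) (v d : α) (hk : k < l.size) :
    (l.setIfInBounds k v).getD k d = v := by
  rw [Array.getD_eq_getD_getElem?, Array.getElem?_setIfInBounds, if_pos rfl, if_pos hk]; rfl

lemma pvGetD_set_ne {α : Type} (l : Array α) (k m : Nat) (v d : α) (h : k ≠ m) :
    (l.setIfInBounds k v).getD m d = l.getD m d := by
  rw [Array.getD_eq_getD_getElem?, Array.getElem?_setIfInBounds, if_neg h,
    ← Array.getD_eq_getD_getElem?]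

lemma pvAGet?_nonneg {α : Type} (a : Array α) {i : Int} (h : 0 ≤ i) :
    pvAGet? a i = a[i.toNat]? := if_pos h

lemma pvASet_nonneg {α : Type} (a : Array α) {i : Int} (v : α) (h : 0 ≤ i) :
    pvASet a i v = a.setIfInBounds i.toNat v := if_pos h

lemma pvInitGet {α : Type} (f : Int → α) (n i : Nat) (hi : i ≤ n) (d : α) :
    (((PySem.List.pyRange 0 ((n : Int) + 1)).map f).toArray).getD i d = f (i : Int) := by
  have hc : ((n : Int) + 1) = (((n + 1 : Nat) : Nat) : Int) := by push_cast; ring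
  rw [Array.getD_eq_getD_getElem?, List.getElem?_toArray, hc,
    PySem.List.getElem?_map_pyRange_zero f (n + 1) i (by omega)]
  rfl

lemma pvInitLen {α : Type} (f : Int → α) (n : Nat) :
    (((PySem.List.pyRange 0 ((n : Int) + 1)).map f).toArray).size = n + 1 := by
  rw [List.size_toArray, List.length_map, PySem.List.length_pyRange_one]; omega

lemma pvGood_init (packs : List Int) (n : Nat) : pvGood packs n (pvInit n) := by
  unfold pvGood pvInit pvM pvI pvD
  refine ⟨pvInitLen _ n, pvInitLen _ n, pvInitLen _ n, ?_, ?_, ?_, ?_⟩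
  · rw [pvInitGet _ n 0 (by omega)]; simp
  · rw [pvInitGet _ n 0 (by omega)]
  · rw [pvInitGet _ n 0 (by omega)]; simp
  · intro i hi1 hin
    constructor
    · intro _
      constructor
      · exact pvInitGet _ n i hin _
      · rw [pvInitGet _ n i hin]
        rw [if_neg (by exact_mod_cast (by omega : ¬ (i : Int) = 0))]
    · intro v hv
      rw [pvInitGet _ n i hin, if_neg (by exact_mod_cast (by omega : ¬ (i : Int) = 0))] at hv
      exact absurd hv (by simp)

lemma pvStep_cases (packs : List Int) (s : PvC)
    (hp : ∀ x ∈ packs, 0 ≤ x)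
    (j i : Int) (hj0 : 0 ≤ j) (hjl : j < (packs.length : Int)) (hi1 : 1 ≤ i) :
    (pvInnerC packs j s i = s ∧
      (PySem.List.pyGetD packs j 0 ≤ i →
        pvInfGt (pvM s i.toNat)
          (pvInfAdd1 (pvM s (i.toNat - (PySem.List.pyGetD packs j 0).toNat))) = false)) ∨
    ∃ (p w : Int), PySem.List.pyGetD packs j 0 = p ∧ 1 ≤ p ∧ p ≤ i ∧
      pvM s (i.toNat - p.toNat) = some w ∧
      pvInfGt (pvM s i.toNat) (some (1 + w)) = true ∧
      pvInnerC packs j s i =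
        (s.1.setIfInBounds i.toNat (some (1 + w)), s.2.1.setIfInBounds i.toNat j,
         s.2.2.setIfInBounds i.toNat
           (some (pvFresh p ((pvD s (i.toNat - p.toNat)).getD PySem.Dict.empty)))) := by
  have hjn : j.toNat < packs.length := by omega
  have hmem : PySem.List.pyGetD packs j 0 ∈ packs := by
    rw [PySem.List.pyGetD_eq_getElem _ _ hj0 (by omega)]
    exact List.getElem_mem _
  have hpk : 0 ≤ PySem.List.pyGetD packs j 0 := hp _ hmem
  set p := PySem.List.pyGetD packs j 0 with hpdef
  unfold pvInnerC
  dsimp only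
  by_cases hge : i ≥ p
  · rw [if_pos hge]
    have hsub : 0 ≤ i - p := by omega
    have hreadm : ((pvAGet? s.1 (i - p)).getD none) = pvM s (i - p).toNat := by
      rw [pvAGet?_nonneg _ hsub, ← Array.getD_eq_getD_getElem?]; rfl
    have hreadi : ((pvAGet? s.1 i).getD none) = pvM s i.toNat := by
      rw [pvAGet?_nonneg _ (by omega : (0:Int) ≤ i), ← Array.getD_eq_getD_getElem?]; rfl
    have hreadc : ((pvAGet? s.2.2 (i - p)).getD none) = pvD s (i - p).toNat := by
      rw [pvAGet?_nonneg _ hsub, ← Array.getD_eq_getD_getElem?]; rfl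
    rw [hreadm, hreadi, hreadc]
    by_cases hgt : pvInfGt (pvM s i.toNat) (pvInfAdd1 (pvM s (i - p).toNat)) = true
    · rw [if_pos hgt]
      right
      obtain ⟨w, hw⟩ : ∃ w, pvM s (i - p).toNat = some w := by
        cases hmp : pvM s (i - p).toNat with
        | none => rw [hmp] at hgt; cases hmi : pvM s i.toNat <;>
            rw [hmi] at hgt <;> simp [pvInfAdd1, pvInfGt] at hgt
        | some w => exact ⟨w, rfl⟩
      have hgt' : pvInfGt (pvM s i.toNat) (some (1 + w)) = true := by
        rw [hw] at hgt; simpa [pvInfAdd1] using hgt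
      have hp1 : 1 ≤ p := by
        rcases (by omega : p = 0 ∨ 1 ≤ p) with h0 | h1
        · exfalso
          rw [h0, sub_zero] at hw
          rw [hw] at hgt'
          simp [pvInfGt] at hgt'
        · exact h1
      have htn : (i - p).toNat = i.toNat - p.toNat := by omega
      refine ⟨p, w, rfl, hp1, hge, by rw [← htn]; exact hw, hgt', ?_⟩
      rw [hw, htn]
      rw [pvASet_nonneg _ _ (by omega : (0:Int) ≤ i),
          pvASet_nonneg _ _ (by omega : (0:Int) ≤ i),
          pvASet_nonneg _ _ (by omega : (0:Int) ≤ i)]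
      rfl
    · rw [if_neg hgt]
      left
      refine ⟨rfl, fun _ => ?_⟩
      have htn : (i - p).toNat = i.toNat - p.toNat := by omega
      rw [htn] at hgt
      simpa using hgt
  · rw [if_neg hge]
    left
    exact ⟨rfl, fun hle => absurd hle (by omega)⟩

lemma pvGood_step (packs : List Int) (n : Nat) (hp : ∀ x ∈ packs, 0 ≤ x) (s : PvC)
    (hs : pvGood packs n s) (j i : Int) (hj0 : 0 ≤ j) (hjl : j < (packs.length : Int))
    (hi1 : 1 ≤ i) (hin : i ≤ (n : Int)) :
    pvGood packs n (pvInnerC packs j s i) := by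
  rcases pvStep_cases packs s hp j i hj0 hjl hi1 with ⟨heq, _⟩ | ⟨p, w, hpdef, hp1, hpi, hw, hgt, heq⟩
  · rw [heq]; exact hs
  rw [heq]
  obtain ⟨h1, h2, h3, h4, h5, h6, h7⟩ := hs
  set iN := i.toNat with hiN
  set pN := p.toNat with hpN
  have hpcast : (pN : Int) = p := by omega
  have hkN : iN - pN ≠ iN := by omega
  have hlt1 : iN < s.1.size := by omega
  have hlt2 : iN < s.2.1.size := by omega
  have hlt3 : iN < s.2.2.size := by omega
  have hgetd : packs.getD j.toNat 0 = p := by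
    rw [List.getD_eq_getElem?_getD, List.getElem?_eq_getElem (by omega), Option.getD_some]
    rw [← hpdef, PySem.List.pyGetD_eq_getElem _ _ hj0 (by omega)]
  have hpmem : p ∈ packs := by
    rw [← hgetd, List.getD_eq_getElem?_getD, List.getElem?_eq_getElem (by omega), Option.getD_some]
    exact List.getElem_mem _
  -- the parent cell carries a dict and a bag
  have hparent : ∃ d, pvD s (iN - pN) = some d ∧
      ∃ L : List Int, (∀ x ∈ L, x ∈ packs) ∧ (∀ x ∈ L, 1 ≤ x) ∧
        L.sum = ((iN - pN : Nat) : Int) ∧ (L.length : Int) = w := by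
    rcases Nat.eq_zero_or_pos (iN - pN) with h0 | hpos
    · rw [h0] at hw ⊢
      rw [h4] at hw
      refine ⟨PySem.Dict.empty, h6, [], by simp, by simp, by simp, ?_⟩
      simpa using (Option.some.inj hw)
    · rcases (h7 (iN - pN) hpos (by omega)).2 w hw with
        ⟨j₂, p₂, _, _, _, _, _, ⟨w₂, _, _, d₂, hd₂, _⟩, ⟨L₂, hLa, hLb, hLc, hLd⟩⟩
      exact ⟨pvFresh (p₂ : Int) d₂, hd₂, L₂, hLa, hLb, hLc, hLd⟩
  obtain ⟨d, hd, L, hLmem, hLpos, hLsum, hLlen⟩ := hparent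
  have hw0 : 0 ≤ w := by rw [← hLlen]; exact_mod_cast Nat.zero_le _
  refine ⟨by simpa using h1, by simpa using h2, by simpa using h3, ?_, ?_, ?_, ?_⟩
  · show (s.1.setIfInBounds iN _).getD 0 none = some 0
    rw [pvGetD_set_ne _ _ _ _ _ (by omega)]; exact h4
  · show (s.2.1.setIfInBounds iN _).getD 0 (-1) = -1
    rw [pvGetD_set_ne _ _ _ _ _ (by omega)]; exact h5
  · show (s.2.2.setIfInBounds iN _).getD 0 none = some PySem.Dict.empty
    rw [pvGetD_set_ne _ _ _ _ _ (by omega)]; exact h6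
  intro i' hi'1 hi'n
  by_cases hii : i' = iN
  · subst hii
    constructor
    · intro hnone
      exfalso
      have hv' : (s.1.setIfInBounds iN (some (1 + w))).getD iN none = some (1 + w) :=
        pvGetD_set_self _ _ _ _ hlt1
      rw [show pvM (s.1.setIfInBounds iN (some (1 + w)), s.2.1.setIfInBounds iN j,
            s.2.2.setIfInBounds iN (some (pvFresh p ((pvD s (iN - pN)).getD PySem.Dict.empty)))) iN
          = (s.1.setIfInBounds iN (some (1 + w))).getD iN none from rfl, hv'] at hnone
      simp at hnone
    · intro v hv
      have hveq : v = 1 + w := by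
        have hv' : (s.1.setIfInBounds iN (some (1 + w))).getD iN none = some (1 + w) :=
          pvGetD_set_self _ _ _ _ hlt1
        rw [show pvM (s.1.setIfInBounds iN (some (1 + w)), s.2.1.setIfInBounds iN j,
              s.2.2.setIfInBounds iN (some (pvFresh p ((pvD s (iN - pN)).getD PySem.Dict.empty)))) iN
            = (s.1.setIfInBounds iN (some (1 + w))).getD iN none from rfl, hv'] at hv
        exact (Option.some.inj hv).symm
      refine ⟨j.toNat, pN, ?_, by omega, by rw [hgetd]; omega, by omega, by omega, ?_, ?_⟩
      · show (s.2.1.setIfInBounds iN j).getD iN (-1) = (j.toNat : Int)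
        rw [pvGetD_set_self _ _ _ _ hlt2]; omega
      · refine ⟨w, ?_, by omega, ?_⟩
        · show (s.1.setIfInBounds iN (some (1 + w))).getD (iN - pN) none = some w
          rw [pvGetD_set_ne _ _ _ _ _ (by omega)]; exact hw
        · refine ⟨d, ?_, ?_⟩
          · show (s.2.2.setIfInBounds iN _).getD iN none = some (pvFresh ((pN : Int)) d)
            rw [pvGetD_set_self _ _ _ _ hlt3, hd, Option.getD_some, hpcast]
          · intro _
            show (s.2.2.setIfInBounds iN _).getD (iN - pN) none = some d
            rw [pvGetD_set_ne _ _ _ _ _ (by omega)]; exact hd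
      · refine ⟨p :: L, ?_, ?_, ?_, ?_⟩
        · intro x hx; rcases List.mem_cons.mp hx with h | h
          · rw [h]; exact hpmem
          · exact hLmem x h
        · intro x hx; rcases List.mem_cons.mp hx with h | h
          · rw [h]; exact hp1
          · exact hLpos x h
        · rw [List.sum_cons, hLsum]; omega
        · simp only [List.length_cons]; omega
  · -- untouched cell
    have em : pvM (s.1.setIfInBounds iN (some (1 + w)), s.2.1.setIfInBounds iN j,
        s.2.2.setIfInBounds iN (some (pvFresh p ((pvD s (iN - pN)).getD PySem.Dict.empty)))) i'
        = pvM s i' := by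
      show (s.1.setIfInBounds iN _).getD i' none = _
      rw [pvGetD_set_ne _ _ _ _ _ (fun h => hii h.symm)]; rfl
    have ei : pvI (s.1.setIfInBounds iN (some (1 + w)), s.2.1.setIfInBounds iN j,
        s.2.2.setIfInBounds iN (some (pvFresh p ((pvD s (iN - pN)).getD PySem.Dict.empty)))) i'
        = pvI s i' := by
      show (s.2.1.setIfInBounds iN _).getD i' (-1) = _
      rw [pvGetD_set_ne _ _ _ _ _ (fun h => hii h.symm)]; rfl
    have ed : pvD (s.1.setIfInBounds iN (some (1 + w)), s.2.1.setIfInBounds iN j,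
        s.2.2.setIfInBounds iN (some (pvFresh p ((pvD s (iN - pN)).getD PySem.Dict.empty)))) i'
        = pvD s i' := by
      show (s.2.2.setIfInBounds iN _).getD i' none = _
      rw [pvGetD_set_ne _ _ _ _ _ (fun h => hii h.symm)]; rfl
    rw [em, ei, ed]
    constructor
    · intro hnone
      exact (h7 i' hi'1 hi'n).1 hnone
    · intro v hv
      rcases (h7 i' hi'1 hi'n).2 v hv with
        ⟨j₂, p₂, e1, e2, e3, e4, e5, ⟨w₂, f1, f2, d₂, f3, f4⟩, ach⟩
      refine ⟨j₂, p₂, e1, e2, e3, e4, e5, ?_, ach⟩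
      by_cases hpar : i' - p₂ = iN
      · -- the parent of i' is the updated cell: its value strictly dropped
        have hw₂ : pvM s iN = some w₂ := by rw [← hpar]; exact f1
        have hdrop : 1 + w < w₂ := by
          rw [hw₂] at hgt; simpa [pvInfGt] using hgt
        refine ⟨1 + w, ?_, by omega, d₂, f3, by omega⟩
        rw [hpar]
        show (s.1.setIfInBounds iN (some (1 + w))).getD iN none = some (1 + w)
        exact pvGetD_set_self _ _ _ _ hlt1
      · refine ⟨w₂, ?_, f2, d₂, f3, ?_⟩
        · show (s.1.setIfInBounds iN _).getD (i' - p₂) none = some w₂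
          rw [pvGetD_set_ne _ _ _ _ _ (fun h => hpar h.symm)]; exact f1
        · intro hwv
          show (s.2.2.setIfInBounds iN _).getD (i' - p₂) none = some d₂
          rw [pvGetD_set_ne _ _ _ _ _ (fun h => hpar h.symm)]; exact f4 hwv

lemma pvGood_run (packs : List Int) (n : Nat) (hp : ∀ p ∈ packs, 0 ≤ p) :
    pvGood packs n (pvRun packs n) := by
  unfold pvRun
  refine List.foldlRecOn _ _ (pvGood_init packs n) ?_
  intro s hs j hj
  unfold pvPass
  refine List.foldlRecOn _ _ hs ?_
  intro s' hs' i hi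
  rw [PySem.List.mem_pyRange_one] at hj hi
  exact pvGood_step packs n hp s' hs' j i hj.1 hj.2 hi.1 (by omega)

-- ordering on DP cells, `none` = infinity on top
def pvLe (a b : Option Int) : Prop := ∀ v, b = some v → ∃ u, a = some u ∧ u ≤ v

lemma pvLe_refl (a : Option Int) : pvLe a a := fun v hv => ⟨v, hv, le_refl v⟩

lemma pvLe_trans {a b c : Option Int} (h1 : pvLe a b) (h2 : pvLe b c) : pvLe a c := by
  intro v hv
  obtain ⟨u, hu, hle⟩ := h2 v hv
  obtain ⟨u', hu', hle'⟩ := h1 u hu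
  exact ⟨u', hu', le_trans hle' hle⟩

lemma pvLe_of_gt_false {a b : Option Int} (h : pvInfGt a b = false) : pvLe a b := by
  cases a <;> cases b <;> simp [pvInfGt, pvLe] at h ⊢
  omega

lemma pvLe_of_gt_true {a : Option Int} {x : Int} (h : pvInfGt a (some x) = true) :
    pvLe (some x) a := by
  intro v hv
  cases a with
  | none => cases hv
  | some a =>
    simp [pvInfGt] at h
    cases hv
    exact ⟨x, rfl, le_of_lt h⟩

def pvPassUpTo (packs : List Int) (j : Int) (s : PvC) (t : Nat) : PvC :=
  (PySem.List.pyRange 1 ((t : Int) + 1)).foldl (pvInnerC packs j) s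

lemma pvPassUpTo_zero (packs : List Int) (j : Int) (s : PvC) :
    pvPassUpTo packs j s 0 = s := by
  unfold pvPassUpTo
  rw [PySem.List.pyRange_one_eq_nil (by omega)]
  rfl

lemma pvPassUpTo_succ (packs : List Int) (j : Int) (s : PvC) (t : Nat) :
    pvPassUpTo packs j s (t + 1) = pvInnerC packs j (pvPassUpTo packs j s t) ((t : Int) + 1) := by
  unfold pvPassUpTo
  have hc : (((t + 1 : Nat) : Int) + 1) = ((t : Int) + 1) + 1 := by push_cast; ring
  rw [hc, PySem.List.pyRange_one_succ_right (by omega), List.foldl_append]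
  rfl

lemma pvPass_eq_upTo (packs : List Int) (n : Nat) (j : Int) (s : PvC) :
    pvPass packs n j s = pvPassUpTo packs j s n := rfl

-- within one pass: lengths, monotonicity, and the post-pass one-step inequality
lemma pvPass_facts (packs : List Int) (n : Nat) (hp : ∀ x ∈ packs, 0 ≤ x)
    (j : Int) (hj0 : 0 ≤ j) (hjl : j < (packs.length : Int)) (s : PvC)
    (h1 : s.1.size = n + 1) :
    ∀ t : Nat, t ≤ n →
      (pvPassUpTo packs j s t).1.size = n + 1 ∧
      (∀ k, pvLe (pvM (pvPassUpTo packs j s t) k) (pvM s k)) ∧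
      (∀ i : Nat, 1 ≤ i → i ≤ t → (PySem.List.pyGetD packs j 0).toNat ≤ i →
        pvLe (pvM (pvPassUpTo packs j s t) i)
          (pvInfAdd1 (pvM (pvPassUpTo packs j s t)
            (i - (PySem.List.pyGetD packs j 0).toNat)))) := by
  intro t
  induction t with
  | zero =>
    intro _
    rw [pvPassUpTo_zero]
    exact ⟨h1, fun k => pvLe_refl _, fun i hi1 hi0 _ => absurd hi0 (by omega)⟩
  | succ t ih =>
    intro htn
    obtain ⟨ihl, ihm, ihp⟩ := ih (by omega)
    rw [pvPassUpTo_succ]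
    set st := pvPassUpTo packs j s t with hst
    have hiN : ((t : Int) + 1).toNat = t + 1 := by omega
    rcases pvStep_cases packs st hp j ((t : Int) + 1) hj0 hjl (by omega)
      with ⟨heq, hfail⟩ | ⟨p, w, hpdef, hp1, hpi, hw, hgt, heq⟩
    · rw [heq]
      refine ⟨ihl, ihm, ?_⟩
      intro i hi1 hit hpile
      rcases (by omega : i ≤ t ∨ i = t + 1) with h | h
      · exact ihp i hi1 h hpile
      · subst h
        have hfail' := hfail (by omega)
        rw [hiN] at hfail'
        exact pvLe_of_gt_false hfail'
    · rw [heq]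
      rw [hiN] at hw hgt
      have hpN1 : 1 ≤ p.toNat := by omega
      refine ⟨by simpa using ihl, ?_, ?_⟩
      · intro k
        simp only [pvM_mk]
        rw [hiN]
        by_cases hk : k = t + 1
        · subst hk
          rw [pvGetD_set_self _ _ _ _ (by omega : t + 1 < st.1.size)]
          exact pvLe_trans (pvLe_of_gt_true hgt) (ihm (t + 1))
        · rw [pvGetD_set_ne _ _ _ _ _ (fun h => hk h.symm)]
          exact ihm k
      · intro i hi1 hit hpile
        have hpt : (PySem.List.pyGetD packs j 0).toNat = p.toNat := by rw [hpdef]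
        simp only [pvM_mk]
        rw [hiN, hpt]
        rcases (by omega : i ≤ t ∨ i = t + 1) with h | h
        · rw [pvGetD_set_ne _ _ _ _ _ (by omega), pvGetD_set_ne _ _ _ _ _ (by omega)]
          have hrec := ihp i hi1 h hpile
          rw [hpt] at hrec
          exact hrec
        · rw [h]
          rw [pvGetD_set_self _ _ _ _ (by omega : t + 1 < st.1.size),
              pvGetD_set_ne _ _ _ _ _ (by omega)]
          rw [show st.1.getD (t + 1 - p.toNat) none = pvM st (t + 1 - p.toNat) from rfl, hw]
          intro v hv
          simp only [pvInfAdd1] at hv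
          cases hv
          exact ⟨1 + w, rfl, le_refl _⟩

-- chaining the post-pass inequality k times
lemma pvPass_k (packs : List Int) (n : Nat) (hp : ∀ x ∈ packs, 0 ≤ x)
    (j : Int) (hj0 : 0 ≤ j) (hjl : j < (packs.length : Int)) (s : PvC)
    (h1 : s.1.size = n + 1) (hp1 : 1 ≤ PySem.List.pyGetD packs j 0) :
    ∀ (k b : Nat), b + k * (PySem.List.pyGetD packs j 0).toNat ≤ n →
      ∀ v, pvM s b = some v →
        ∃ u, u ≤ v + (k : Int) ∧
          pvM (pvPass packs n j s) (b + k * (PySem.List.pyGetD packs j 0).toNat) = some u := by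
  obtain ⟨hl, hm, hpost⟩ := pvPass_facts packs n hp j hj0 hjl s h1 n (le_refl n)
  rw [← pvPass_eq_upTo] at hm hpost
  set pN := (PySem.List.pyGetD packs j 0).toNat with hpN
  have hpN1 : 1 ≤ pN := by omega
  intro k
  induction k with
  | zero =>
    intro b hb v hv
    obtain ⟨u, hu, hle⟩ := hm b v hv
    exact ⟨u, by omega, by simpa using hu⟩
  | succ k ih =>
    intro b hb v hv
    have hsucc : (k + 1) * pN = k * pN + pN := Nat.succ_mul k pN
    obtain ⟨u, hule, hu⟩ := ih b (by omega) v hv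
    have hi1 : 1 ≤ b + (k + 1) * pN := by omega
    have harg : pvInfAdd1 (pvM (pvPass packs n j s) (b + (k + 1) * pN - pN)) = some (1 + u) := by
      rw [show b + (k + 1) * pN - pN = b + k * pN by omega, hu]
      rfl
    obtain ⟨u', hu', hule2⟩ := hpost (b + (k + 1) * pN) hi1 (by omega) (by omega) (1 + u) harg
    exact ⟨u', by push_cast; omega, hu'⟩

def pvRunUpTo (packs : List Int) (n : Nat) (t : Nat) : PvC :=
  (PySem.List.pyRange 0 (t : Int)).foldl (fun st j => pvPass packs n j st) (pvInit n)

lemma pvRunUpTo_zero (packs : List Int) (n : Nat) : pvRunUpTo packs n 0 = pvInit n := by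
  unfold pvRunUpTo
  rw [show ((0 : Nat) : Int) = 0 from rfl, PySem.List.pyRange_one_eq_nil (by omega)]
  rfl

lemma pvRunUpTo_succ (packs : List Int) (n : Nat) (t : Nat) :
    pvRunUpTo packs n (t + 1) = pvPass packs n (t : Int) (pvRunUpTo packs n t) := by
  unfold pvRunUpTo
  have hc : ((t + 1 : Nat) : Int) = (t : Int) + 1 := by push_cast; ring
  rw [hc, PySem.List.pyRange_one_succ_right (by omega), List.foldl_append]
  rfl

lemma pvRun_eq_upTo (packs : List Int) (n : Nat) :
    pvRun packs n = pvRunUpTo packs n packs.length := rfl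

lemma pvRunUpTo_len (packs : List Int) (n : Nat) (hp : ∀ x ∈ packs, 0 ≤ x) :
    ∀ t : Nat, t ≤ packs.length → (pvRunUpTo packs n t).1.size = n + 1 := by
  intro t
  induction t with
  | zero => intro _; rw [pvRunUpTo_zero]; exact pvInitLen _ n
  | succ t ih =>
    intro ht
    rw [pvRunUpTo_succ, pvPass_eq_upTo]
    exact (pvPass_facts packs n hp (t : Int) (by omega) (by omega) _ (ih (by omega)) n
      (le_refl n)).1

lemma pvComplete_upTo (packs : List Int) (n : Nat) (hp : ∀ x ∈ packs, 0 ≤ x) :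
    ∀ t : Nat, t ≤ packs.length →
      ∀ L : List Int, (∀ x ∈ L, x ∈ packs.take t) → (∀ x ∈ L, 1 ≤ x) → L.sum ≤ (n : Int) →
        ∃ v : Int, pvM (pvRunUpTo packs n t) L.sum.toNat = some v ∧ v ≤ (L.length : Int) := by
  intro t
  induction t with
  | zero =>
    intro _ L hmem _ _
    have hL : L = [] := by
      rw [List.eq_nil_iff_forall_not_mem]
      intro a ha
      simpa using hmem a ha
    subst hL
    rw [pvRunUpTo_zero]
    refine ⟨0, ?_, by simp⟩
    show (((PySem.List.pyRange 0 ((n : Int) + 1)).map _).toArray).getD 0 none = some 0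
    rw [pvInitGet _ n 0 (by omega)]
    simp
  | succ t ih =>
    intro ht L hmem hpos hsum
    set p := packs.getD t 0 with hpdef
    have hp0 : 0 ≤ p := by
      rw [hpdef, List.getD_eq_getElem _ _ (by omega)]
      exact hp _ (List.getElem_mem _)
    have hsplitperm := List.filter_append_perm (fun x => decide (x ∈ packs.take t)) L
    set L1 := L.filter (fun x => decide (x ∈ packs.take t)) with hL1
    set L2 := L.filter (fun x => !decide (x ∈ packs.take t)) with hL2
    have hsumsplit : L1.sum + L2.sum = L.sum := by
      rw [← hsplitperm.sum_eq, List.sum_append]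
    have hlensplit : L1.length + L2.length = L.length := by
      rw [← hsplitperm.length_eq, List.length_append]
    have hL1mem : ∀ x ∈ L1, x ∈ packs.take t := by
      intro x hx
      simpa using List.of_mem_filter hx
    have hL1pos : ∀ x ∈ L1, 1 ≤ x := fun x hx => hpos x (List.mem_of_mem_filter hx)
    have hL2p : ∀ x ∈ L2, x = p := by
      intro x hx
      have hxL : x ∈ L := List.mem_of_mem_filter hx
      have hxnot : ¬ x ∈ packs.take t := by simpa using List.of_mem_filter hx
      have hxt : x ∈ packs.take (t + 1) := hmem x hxL
      rw [List.take_add_one] at hxt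
      rcases List.mem_append.mp hxt with h | h
      · exact absurd h hxnot
      · rw [List.getElem?_eq_getElem (by omega)] at h
        simp at h
        rw [h, hpdef, List.getD_eq_getElem _ _ (by omega)]
    have hL2sum : L2.sum = (L2.length : Int) * p := by
      rw [List.sum_eq_card_nsmul L2 p hL2p, nsmul_eq_mul]
    have hcast : ((L2.length * p.toNat : Nat) : Int) = (L2.length : Int) * p := by
      push_cast
      rw [Int.toNat_of_nonneg hp0]
    have hL1sumnn : 0 ≤ L1.sum := List.sum_nonneg (fun x hx => le_trans (by omega) (hL1pos x hx))
    have hL1sumle : L1.sum ≤ (n : Int) := by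
      have h2nn : 0 ≤ L2.sum := List.sum_nonneg
        (fun x hx => le_trans (by omega) (hpos x (List.mem_of_mem_filter hx)))
      omega
    obtain ⟨v1, hv1, hv1le⟩ := ih (by omega) L1 hL1mem hL1pos hL1sumle
    rw [pvRunUpTo_succ]
    have hpy : PySem.List.pyGetD packs (t : Int) 0 = p := by
      rw [PySem.List.pyGetD_eq_getElem _ _ (by omega) (by omega)]
      rw [hpdef, List.getD_eq_getElem _ _ (by omega)]
      simp
    rcases (by omega : p = 0 ∨ 1 ≤ p) with hp01 | hp1
    · -- the pack is 0: L2 must be empty, pass only improves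
      have hL2nil : L2 = [] := by
        rw [List.eq_nil_iff_forall_not_mem]
        intro a ha
        have := hL2p a ha
        have := hpos a (List.mem_of_mem_filter ha)
        omega
      rw [hL2nil] at hsumsplit hlensplit
      simp at hsumsplit hlensplit
      obtain ⟨_, hm, _⟩ := pvPass_facts packs n hp (t : Int) (by omega) (by omega)
        (pvRunUpTo packs n t) (pvRunUpTo_len packs n hp t (by omega)) n (le_refl n)
      rw [← pvPass_eq_upTo] at hm
      obtain ⟨u, hu, hule⟩ := hm L.sum.toNat v1 (by rw [← hsumsplit]; exact hv1)
      exact ⟨u, hu, by omega⟩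
    · -- the pack is positive: chain it L2.length times
      obtain ⟨u, hule, hu⟩ := pvPass_k packs n hp (t : Int) (by omega) (by omega)
        (pvRunUpTo packs n t) (pvRunUpTo_len packs n hp t (by omega)) (by rw [hpy]; omega)
        L2.length L1.sum.toNat
        (by rw [hpy]; omega)
        v1 hv1
      rw [hpy] at hu
      refine ⟨u, ?_, ?_⟩
      · rw [show L.sum.toNat = L1.sum.toNat + L2.length * p.toNat by omega]
        exact hu
      · omega

-- completeness of the DP: any bag of packs bounds the table entry at its sum
lemma pvComplete (packs : List Int) (n : Nat) (hp : ∀ p ∈ packs, 0 ≤ p) :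
    ∀ L : List Int, (∀ x ∈ L, x ∈ packs) → (∀ x ∈ L, 1 ≤ x) → L.sum ≤ (n : Int) →
      ∃ v : Int, pvM (pvRun packs n) L.sum.toNat = some v ∧ v ≤ (L.length : Int) := by
  intro L hmem hpos hsum
  rw [pvRun_eq_upTo]
  exact pvComplete_upTo packs n hp packs.length (le_refl _) L
    (by intro x hx; rw [List.take_length]; exact hmem x hx) hpos hsum

-- final-state characterisation: each reachable cell points one exact step down,
-- and B's dict there was built from the (final) dict one step down
lemma pvLenLeSum (L : List Int) (h : ∀ x ∈ L, 1 ≤ x) : (L.length : Int) ≤ L.sum := by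
  induction L with
  | nil => simp
  | cons x L ih =>
    have hx := h x (List.mem_cons_self)
    have := ih (fun y hy => h y (List.mem_cons_of_mem x hy))
    rw [List.sum_cons, List.length_cons]
    push_cast
    omega

lemma pvFinal (packs : List Int) (n : Nat) (hp : ∀ p ∈ packs, 0 ≤ p) :
    ∀ i : Nat, 1 ≤ i → i ≤ n → ∀ v : Int, pvM (pvRun packs n) i = some v →
      1 ≤ v ∧ v ≤ (i : Int) ∧
      ∃ j p : Nat, pvI (pvRun packs n) i = (j : Int) ∧ j < packs.length ∧
        packs.getD j 0 = (p : Int) ∧ 1 ≤ p ∧ p ≤ i ∧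
        pvM (pvRun packs n) (i - p) = some (v - 1) ∧
        ∃ d, pvD (pvRun packs n) (i - p) = some d ∧
          pvD (pvRun packs n) i = some (pvFresh (p : Int) d) := by
  intro i hi1 hin v hv
  obtain ⟨h1, h2, h3, h4, h5, h6, h7⟩ := pvGood_run packs n hp
  rcases (h7 i hi1 hin).2 v hv with
    ⟨j, p, e1, e2, e3, e4, e5, ⟨w, f1, f2, d, f3, f4⟩, ⟨L, g1, g2, g3, g4⟩⟩
  have hv1 : 1 ≤ v := by
    rcases L with _ | ⟨x, L'⟩
    · exfalso
      simp at g3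
      omega
    · rw [← g4]
      simp only [List.length_cons]
      push_cast
      omega
  have hlen := pvLenLeSum L g2
  have hvi : v ≤ (i : Int) := by omega
  have hbagp : ∃ L' : List Int, (∀ x ∈ L', x ∈ packs) ∧ (∀ x ∈ L', 1 ≤ x) ∧
      L'.sum = ((i - p : Nat) : Int) ∧ (L'.length : Int) = w := by
    rcases Nat.eq_zero_or_pos (i - p) with h0 | hpos
    · rw [h0] at f1 ⊢
      rw [h4] at f1
      exact ⟨[], by simp, by simp, by simp, by simpa using (Option.some.inj f1)⟩
    · rcases (h7 (i - p) hpos (by omega)).2 w f1 with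
        ⟨_, _, _, _, _, _, _, _, ⟨L', a1, a2, a3, a4⟩⟩
      exact ⟨L', a1, a2, a3, a4⟩
  obtain ⟨L', a1, a2, a3, a4⟩ := hbagp
  have hpmem : (p : Int) ∈ packs := by
    rw [List.getD_eq_getElem _ _ (by omega)] at e3
    rw [← e3]
    exact List.getElem_mem _
  obtain ⟨u, hu, hule⟩ := pvComplete packs n hp ((p : Int) :: L')
    (by
      intro x hx
      rcases List.mem_cons.mp hx with h | h
      · rw [h]; exact hpmem
      · exact a1 x h)
    (by
      intro x hx
      rcases List.mem_cons.mp hx with h | h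
      · rw [h]; exact_mod_cast e4
      · exact a2 x h)
    (by rw [List.sum_cons, a3]; omega)
  have hidx : (((p : Int) :: L').sum).toNat = i := by
    rw [List.sum_cons, a3]; omega
  rw [hidx, hv] at hu
  have huv : u = v := (Option.some.inj hu).symm
  have hweq : w = v - 1 := by
    rw [List.length_cons] at hule
    push_cast at hule
    omega
  exact ⟨hv1, hvi, j, p, e1, e2, e3, e4, e5, by rw [← hweq]; exact f1, d, f4 hweq, f3⟩

lemma pvTraceLem (packs : List Int) (n : Nat) (hp : ∀ p ∈ packs, 0 ≤ p) :
    ∀ v : Nat, ∀ i : Nat, i ≤ n → pvM (pvRun packs n) i = some (v : Int) →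
      ∀ fuel : Nat, v + 1 ≤ fuel → ∀ queue : List Int,
        ∃ qs : List Int,
          pvTrace packs (pvRun packs n).2.1 fuel (i : Int) queue = queue ++ qs ∧
          pvD (pvRun packs n) i = some (pvCountD qs) := by
  intro v
  induction v with
  | zero =>
    intro i hin hv fuel hfuel queue
    obtain ⟨h1, h2, h3, h4, h5, h6, h7⟩ := pvGood_run packs n hp
    rcases Nat.eq_zero_or_pos i with h0 | hpos
    · subst h0
      obtain ⟨f, rfl⟩ : ∃ f, fuel = f + 1 := ⟨fuel - 1, by omega⟩
      refine ⟨[], ?_, ?_⟩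
      · simp [pvTrace]
      · rw [h6]; rfl
    · exfalso
      have h1v := (pvFinal packs n hp i hpos hin _ hv).1
      omega
  | succ v ih =>
    intro i hin hv fuel hfuel queue
    obtain ⟨h1, h2, h3, h4, h5, h6, h7⟩ := pvGood_run packs n hp
    rcases Nat.eq_zero_or_pos i with h0 | hpos
    · exfalso
      subst h0
      rw [h4] at hv
      have := Option.some.inj hv
      omega
    · obtain ⟨hv1, hvi, j, p, e1, e2, e3, e4, e5, hm1, d, hd1, hd2⟩ :=
        pvFinal packs n hp i hpos hin _ hv
      obtain ⟨f, rfl⟩ : ∃ f, fuel = f + 1 := ⟨fuel - 1, by omega⟩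
      have hpack : (PySem.List.pyGet? packs
          ((pvAGet? (pvRun packs n).2.1 ((i : Nat) : Int)).getD (-1))).getD 0
          = ((p : Nat) : Int) := by
        have hub : ((pvAGet? (pvRun packs n).2.1 ((i : Nat) : Int)).getD (-1))
            = pvI (pvRun packs n) i := by
          rw [pvAGet?_nonneg _ (by omega : (0:Int) ≤ ((i : Nat) : Int)),
              show ((i : Nat) : Int).toNat = i by omega]
          exact (Array.getD_eq_getD_getElem?).symm
        rw [hub, e1, PySem.List.pyGet?_natCast,
            List.getElem?_eq_getElem (by omega : j < packs.length), Option.getD_some,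
            ← List.getD_eq_getElem _ 0 (by omega)]
        exact e3
      have hstep : pvTrace packs (pvRun packs n).2.1 (f + 1) ((i : Nat) : Int) queue
          = pvTrace packs (pvRun packs n).2.1 f (((i - p : Nat) : Nat) : Int)
              (queue ++ [((p : Nat) : Int)]) := by
        simp only [pvTrace]
        rw [if_pos (by omega : ¬ ((i : Nat) : Int) = 0), hpack,
            show ((i : Nat) : Int) - ((p : Nat) : Int) = (((i - p : Nat) : Nat) : Int) by omega]
      have hm1' : pvM (pvRun packs n) (i - p) = some ((v : Nat) : Int) := by
        rw [hm1]
        congr 1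
        push_cast
        ring
      obtain ⟨qs', hq1, hq2⟩ := ih (i - p) (by omega) hm1' f (by omega) (queue ++ [((p : Nat) : Int)])
      refine ⟨((p : Nat) : Int) :: qs', ?_, ?_⟩
      · rw [hstep, hq1, List.append_assoc]
        rfl
      · rw [hd2]
        have hdq : d = pvCountD qs' := by
          rw [hd1] at hq2
          exact Option.some.inj hq2
        rw [hdq]
        rfl

lemma pvCount_eq (l : List Int) (x : Int) : PySem.List.count l x = l.count x := rfl

lemma pvFilterMapPair (g : Int → Int) (s : List Int) (x : Int) :
    ((s.map (fun k => (k, g k))).filter (fun kv => decide ¬(kv.1 = x)))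
      = (s.filter (fun k => decide ¬(k = x))).map (fun k => (k, g k)) := by
  induction s with
  | nil => rfl
  | cons a s ih =>
    simp only [decide_not] at ih
    by_cases h : a = x <;> simp [h, ih]

lemma pvMapFstFilter (l : List (Int × Int)) (p : Int) :
    (l.filter (fun kv => decide ¬(kv.1 = p))).map (fun kv : Int × Int => kv.1)
      = (l.map (fun kv : Int × Int => kv.1)).filter (fun k => decide ¬(k = p)) := by
  induction l with
  | nil => rfl
  | cons a l ih =>
    simp only [decide_not] at ih
    by_cases h : a.1 = p <;> simp [h, ih]

lemma pvItemsFresh (p : Int) (prev : PySem.Dict Int Int) (h : prev.keys.Nodup) :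
    (pvFresh p prev).items
      = (p, prev.getD p 0 + 1) :: prev.items.filter (fun kv => decide ¬(kv.1 = p)) := by
  unfold pvFresh
  simp only [ne_eq]
  rw [PySem.List.foldl_ite_eq_foldl_filter (fun kv : Int × Int => ¬(kv.1 = p))
    (fun d (kv : Int × Int) => d.insert kv.1 kv.2) prev.items
    (PySem.Dict.empty.insert p (prev.getD p 0 + 1))]
  rw [PySem.Dict.items_foldl_insert_fresh _ (fun kv : Int × Int => kv.1)
    (fun kv : Int × Int => kv.2) _ ?_ ?_]
  · rw [PySem.Dict.items_insert_of_not_contains _ _ (PySem.Dict.contains_empty p)]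
    simp
    rfl
  · intro a ha
    have hne : ¬ a.1 = p := by simpa using List.of_mem_filter ha
    simp [PySem.Dict.contains_insert, PySem.Dict.contains_empty, hne]
  · rw [pvMapFstFilter]
    apply List.Nodup.filter
    simpa [PySem.Dict.keys] using h

lemma pvCountD_items (q : List Int) :
    (pvCountD q).items = (PySem.Set.ofList q).map (fun k => (k, (q.count k : Int))) := by
  induction q with
  | nil => rfl
  | cons x q ih =>
    have ihn : (pvCountD q).keys.Nodup := by
      have hk : (pvCountD q).keys = PySem.Set.ofList q := by
        simp only [PySem.Dict.keys, ih, List.map_map]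
        rw [show ((fun p : Int × Int => p.1) ∘ (fun k : Int => (k, (q.count k : Int)))) = id
          from funext fun k => rfl, List.map_id]
      rw [hk]
      exact PySem.Set.nodup_ofList q
    have hgetD : (pvCountD q).getD x 0 = (q.count x : Int) := by
      by_cases hx : x ∈ q
      · exact PySem.Dict.getD_of_mem_items _
          (by rw [ih]; exact List.mem_map_of_mem ((PySem.Set.mem_ofList q x).mpr hx)) ihn 0
      · rw [PySem.Dict.getD_of_not_contains _ _ ?_]
        · rw [List.count_eq_zero_of_not_mem hx]; rfl
        · rw [PySem.Dict.contains_eq_decide_mem_keys]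
          have hk : (pvCountD q).keys = PySem.Set.ofList q := by
            simp only [PySem.Dict.keys, ih, List.map_map]
            rw [show ((fun p : Int × Int => p.1) ∘ (fun k : Int => (k, (q.count k : Int)))) = id
              from funext fun k => rfl, List.map_id]
          rw [hk]
          simp [PySem.Set.mem_ofList, hx]
    rw [show pvCountD (x :: q) = pvFresh x (pvCountD q) from rfl, pvItemsFresh x _ ihn, ih,
        hgetD, PySem.Set.ofList_cons, List.map_cons]
    congr 1
    · congr 1
      push_cast [List.count_cons_self]
      ring
    · rw [pvFilterMapPair]
      have hdis : (PySem.Set.ofList q).discard x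
          = (PySem.Set.ofList q).filter (fun k => decide ¬(k = x)) := by
        simp only [PySem.Set.discard]
        apply List.filter_congr
        intro y _
        by_cases h : y = x <;> simp [h]
      rw [hdis]
      apply List.map_congr_left
      intro k hk
      have hkx : ¬ k = x := by simpa using List.of_mem_filter hk
      rw [List.count_cons_of_ne (fun h => hkx h.symm)]

lemma pvAFoldGet (f : Int → Int) (l : List Int) : ∀ (d : PySem.Dict Int Int) (k : Int),
    (l.foldl (fun d x => d.insert x (f x)) d).get? k = if k ∈ l then some (f k) else d.get? k := by
  induction l with
  | nil => intro d k; simp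
  | cons a l ih =>
    intro d k
    rw [List.foldl_cons, ih]
    by_cases hkl : k ∈ l
    · rw [if_pos hkl, if_pos (List.mem_cons_of_mem a hkl)]
    · by_cases hka : k = a
      · subst hka
        rw [if_neg hkl, if_pos List.mem_cons_self, PySem.Dict.get?_insert_self]
      · rw [if_neg hkl, if_neg (by simp [hka, hkl]), PySem.Dict.get?_insert_of_ne _ _ hka]

-- A's dict comprehension {q: queue.count(q) for q in queue} equals B's back-to-front build
lemma pvCountEq (q : List Int) :
    (q.foldl (fun d x => PySem.Dict.insert d x ((PySem.List.count q x : Nat) : Int))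
      PySem.Dict.empty) = pvCountD q := by
  apply PySem.Dict.ext
  have hnodupA : (q.foldl (fun d x => PySem.Dict.insert d x ((PySem.List.count q x : Nat) : Int))
      PySem.Dict.empty).keys.Nodup :=
    PySem.Dict.nodup_keys_foldl_insert q _ _ PySem.Dict.nodup_keys_empty
  have hkeysA : (q.foldl (fun d x => PySem.Dict.insert d x ((PySem.List.count q x : Nat) : Int))
      PySem.Dict.empty).keys = PySem.Set.ofList q := by
    rw [PySem.Dict.keys_foldl_insert q (fun _ x => ((PySem.List.count q x : Nat) : Int))
      PySem.Dict.empty, PySem.Dict.keys_empty, PySem.Set.ofList_eq_foldl]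
    rfl
  rw [pvCountD_items, PySem.Dict.items_eq_map_keys _ hnodupA 0, hkeysA]
  apply List.map_congr_left
  intro k hk
  have hkq : k ∈ q := (PySem.Set.mem_ofList q k).mp hk
  have hget : (q.foldl (fun d x => PySem.Dict.insert d x ((PySem.List.count q x : Nat) : Int))
      PySem.Dict.empty).get? k = some ((PySem.List.count q k : Nat) : Int) := by
    rw [pvAFoldGet (fun x => ((PySem.List.count q x : Nat) : Int)) q PySem.Dict.empty k,
        if_pos hkq]
  rw [PySem.Dict.getD_eq_get?_getD, hget, Option.getD_some, pvCount_eq]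

lemma pvRun_zero (packs : List Int) : pvRun packs 0 = pvInit 0 := by
  unfold pvRun pvPass
  rw [show ((0 : Nat) : Int) + 1 = 1 by ring, PySem.List.pyRange_one_eq_nil (le_refl 1)]
  simp only [List.foldl_nil]
  exact PySem.List.foldl_ignore _ _

-- ===== VERDICT (by name: the statement is the Claim_ definition above) =====
theorem get_order_qty_spec : Claim_equal_get_order_qty := by
  unfold Claim_equal_get_order_qty
  intro packs user_qty _ hpre
  unfold Spec_get_order_qty
  obtain ⟨hq0, hcase⟩ := hpre
  have hrun : pvGood packs user_qty.toNat (pvRun packs user_qty.toNat) := by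
    rcases hcase with hq | hp
    · rw [show user_qty.toNat = 0 by omega, pvRun_zero]
      exact pvGood_init packs 0
    · exact pvGood_run packs user_qty.toNat hp
  obtain ⟨h1, h2, h3, h4, h5, h6, h7⟩ := hrun
  rw [pvProjB packs user_qty hq0, if_neg (by omega : ¬ user_qty < 0)]
  unfold get_order_qty
  dsimp only
  rw [pvProjA packs user_qty hq0]
  have hgetc : (pvAGet? (pvRun packs user_qty.toNat).2.2 user_qty).getD none
      = pvD (pvRun packs user_qty.toNat) user_qty.toNat := by
    rw [pvAGet?_nonneg _ hq0]
    exact (Array.getD_eq_getD_getElem?).symm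
  have hstart : (((pvRun packs user_qty.toNat).2.1.size : Int)) - 1
      = ((user_qty.toNat : Nat) : Int) := by
    rw [h2]; push_cast; ring
  rw [hgetc, hstart]
  have hgeti : (pvAGet? (pvRun packs user_qty.toNat).2.1
      ((user_qty.toNat : Nat) : Int)).getD (-1)
      = pvI (pvRun packs user_qty.toNat) user_qty.toNat := by
    rw [pvAGet?_nonneg _ (by omega : (0:Int) ≤ ((user_qty.toNat : Nat) : Int)),
        show ((user_qty.toNat : Nat) : Int).toNat = user_qty.toNat by omega]
    exact (Array.getD_eq_getD_getElem?).symm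
  rw [hgeti]
  cases hm : pvM (pvRun packs user_qty.toNat) user_qty.toNat with
  | none =>
    have hpos : 1 ≤ user_qty.toNat := by
      rcases Nat.eq_zero_or_pos user_qty.toNat with h0 | hpos
      · rw [h0] at hm h4
        rw [h4] at hm
        cases hm
      · omega
    obtain ⟨hI, hD⟩ := (h7 user_qty.toNat hpos (le_refl _)).1 hm
    rw [hI, if_pos rfl, hD]
  | some v =>
    rcases Nat.eq_zero_or_pos user_qty.toNat with h0 | hpos
    · rw [h0] at h5 h6 ⊢
      rw [h5, if_pos rfl, h6]
      rfl
    · have hp : ∀ x ∈ packs, 0 ≤ x := by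
        rcases hcase with hq | hp
        · exfalso; omega
        · exact hp
      obtain ⟨hv1, hvi, j, p, e1, e2, e3, e4, e5, hm1, d, hd1, hd2⟩ :=
        pvFinal packs user_qty.toNat hp user_qty.toNat hpos (le_refl _) v hm
      rw [e1, if_neg (by omega : ¬ ((j : Nat) : Int) = -1)]
      obtain ⟨qs, htr, hdq⟩ := pvTraceLem packs user_qty.toNat hp v.toNat user_qty.toNat
        (le_refl _) (by rw [show ((v.toNat : Nat) : Int) = v by omega]; exact hm)
        (user_qty.toNat + 1) (by omega) []
      rw [htr, List.nil_append, pvCountEq qs, hdq]
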